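-- pv_equiv track=rewrite | github.com/swamp0407/competitive-programming | arc135/a/main.py | cul
-- ===== SOURCE A (Python) =====
-- mod = 998244353
--
-- memo = {}
--
-- def cul(x):
--     if x == 2:
--         return 2
--     elif x == 3:
--         return 3
--     else:
--         if memo.get(x):
--             return memo[x]
--         else:
--             memo[x] = cul(x//2)*cul((x*10+10)//20) % mod
--             return memo[x]
-- ===== SOURCE B (Python) =====
-- def cul(x):
--     # Iterative O(log x): level k holds only floor(x/2^k) and ceil(x/2^k),
--     # so descend recording these pairs, then fold back up; no memo dict needed.
--     mod = 998244353
--     levels = []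
--     lo = hi = x
--     while hi > 3:
--         levels.append((lo, hi))
--         lo, hi = lo // 2, (hi + 1) // 2
--     vals = {}
--     for n in (lo, hi):
--         if n == 2 or n == 3:
--             vals[n] = n
--     for lo, hi in reversed(levels):
--         nv = {}
--         for n in (lo, hi):
--             if n == 2 or n == 3:
--                 nv[n] = n
--             else:
--                 nv[n] = vals[n // 2] * vals[(n + 1) // 2] % mod
--         vals = nv
--     return vals[x]
-- ===== Notes on version B (the rewrite author's own statement) =====
-- stated objective: alternative
-- what changed: Replaced the memoized recursion over a global dict by an iterative two-phase algorithm: descend recording the (floor(x/2^k), ceil(x/2^k)) pair of each level (the only values the recursion can visit), then fold back up computing each level's at most two values from the previous pair, with no memo dict and no recursion.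
import Mathlib
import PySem

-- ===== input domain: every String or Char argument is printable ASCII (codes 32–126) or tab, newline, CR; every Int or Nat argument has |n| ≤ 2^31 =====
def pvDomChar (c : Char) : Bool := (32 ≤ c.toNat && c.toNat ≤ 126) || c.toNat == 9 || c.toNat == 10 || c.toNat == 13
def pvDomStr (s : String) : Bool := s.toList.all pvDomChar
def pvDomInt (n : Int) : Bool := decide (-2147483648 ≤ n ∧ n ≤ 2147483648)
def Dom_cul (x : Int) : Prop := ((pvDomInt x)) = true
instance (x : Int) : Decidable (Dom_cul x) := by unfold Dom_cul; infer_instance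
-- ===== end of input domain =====

-- B replaces A's memoized recursion by an iterative descend/ascend over the at-most-two
-- values per halving level ("alternative" objective); equivalence is about return values
-- only (A also fills a cross-call global memo, which never changes any return value).

-- ===== PORT A =====
-- A recurses with a memo dict; ported with the memo threaded through and a fuel bound
-- (fuel = |x|+1 exceeds the recursion depth wherever A terminates; A's global memo starts
-- empty here — memoization never changes the returned values).
def culGo : Nat → PySem.Dict Int Int → Int → Int × PySem.Dict Int Int
  | 0, memo, _ => (0, memo)   -- unreachable under Pre_cul
  | fuel+1, memo, x =>
    if x = 2 then (2, memo)
    else if x = 3 then (3, memo)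
    else if ((memo.get? x).getD 0) ≠ 0 then   -- Python truthiness of memo.get(x)
      ((memo.get? x).getD 0, memo)
    else
      let r1 := culGo fuel memo (PySem.Int.floordiv x 2)
      let r2 := culGo fuel r1.2 (PySem.Int.floordiv (x*10+10) 20)
      let v := PySem.Int.mod (r1.1 * r2.1) 998244353
      (v, r2.2.insert x v)

def cul (x : Int) : Int := (culGo (x.natAbs + 1) PySem.Dict.empty x).1

-- ===== PORT B =====
-- descend: record the (lo, hi) pair of each level while hi > 3
def bDescend (lo hi : Int) (acc : List (Int × Int)) : List (Int × Int) × Int × Int :=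
  if _h : 3 < hi then
    bDescend (PySem.Int.floordiv lo 2) (PySem.Int.floordiv (hi+1) 2) (acc ++ [(lo, hi)])
  else (acc, lo, hi)
termination_by hi.toNat
decreasing_by
  rw [PySem.Int.floordiv_eq_ediv_of_pos (by norm_num : (0:Int) < 2)]
  omega

def bCell (vals : PySem.Dict Int Int) (n : Int) : Int :=
  if n = 2 ∨ n = 3 then n
  else PySem.Int.mod ((vals.get? (PySem.Int.floordiv n 2)).getD 0 *
                      (vals.get? (PySem.Int.floordiv (n+1) 2)).getD 0) 998244353

def bBase (lo hi : Int) : PySem.Dict Int Int :=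
  let d := if lo = 2 ∨ lo = 3 then (PySem.Dict.empty).insert lo lo else PySem.Dict.empty
  if hi = 2 ∨ hi = 3 then d.insert hi hi else d

def bLevel (vals : PySem.Dict Int Int) (lo hi : Int) : PySem.Dict Int Int :=
  ((PySem.Dict.empty).insert lo (bCell vals lo)).insert hi (bCell vals hi)

def cul_alt (x : Int) : Int :=
  let r := bDescend x x []
  let vals := r.1.reverse.foldl (fun vals p => bLevel vals p.1 p.2) (bBase r.2.1 r.2.2)
  (vals.get? x).getD 0   -- vals[x]; the key is present for every x admitted by Pre_cul

-- ===== PRECONDITION & SPEC =====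
-- A terminates (returns) exactly on x ≥ 2; for x ≤ 1 its recursion never reaches a base
-- case and Python raises RecursionError, so those inputs are excluded.
def Pre_cul (x : Int) : Prop := 2 ≤ x
instance (x : Int) : Decidable (Pre_cul x) := by unfold Pre_cul; infer_instance
def pvWitness_cul : Int := 7

def Spec_cul (x : Int) (out : Int) : Prop := out = cul_alt x
instance (x : Int) (out : Int) : Decidable (Spec_cul x out) := by unfold Spec_cul; infer_instance

-- ===== CLAIM (what is proved, stated in full; the proofs are below) =====
def Claim_equal_cul : Prop := ∀ (x : Int), Dom_cul x → Pre_cul x → Spec_cul x (cul x)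

-- ===== LEMMAS AND PROOFS =====

-- the mathematical function both programs compute
def fSpec (x : Int) : Int :=
  if x ≤ 3 then x else fSpec (x/2) * fSpec ((x+1)/2) % 998244353
termination_by x.toNat
decreasing_by all_goals omega

theorem fSpec_base {x : Int} (h : x ≤ 3) : fSpec x = x := by
  rw [fSpec]; simp [h]

theorem fSpec_step {x : Int} (h : 3 < x) :
    fSpec x = fSpec (x/2) * fSpec ((x+1)/2) % 998244353 := by
  rw [fSpec]; simp [show ¬ x ≤ 3 by omega]

theorem fd2 (a : Int) : PySem.Int.floordiv a 2 = a / 2 :=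
  PySem.Int.floordiv_eq_ediv_of_pos (by norm_num)

theorem fd20 (a : Int) : PySem.Int.floordiv (a*10+10) 20 = (a+1) / 2 := by
  rw [PySem.Int.floordiv_eq_ediv_of_pos (by norm_num : (0:Int) < 20)]
  omega

theorem md (a : Int) : PySem.Int.mod a 998244353 = a % 998244353 :=
  PySem.Int.mod_eq_emod_of_pos (by norm_num)

def MemoInv (memo : PySem.Dict Int Int) : Prop :=
  ∀ k v, memo.get? k = some v → v = fSpec k

theorem culGo_eq : ∀ (fuel : Nat) (x : Int) (memo : PySem.Dict Int Int),
    2 ≤ x → x.toNat < fuel → MemoInv memo →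
    (culGo fuel memo x).1 = fSpec x ∧ MemoInv (culGo fuel memo x).2 := by
  intro fuel
  induction fuel with
  | zero => intro x memo hx hf; omega
  | succ fuel ih =>
    intro x memo hx hf hinv
    by_cases h2 : x = 2
    · subst h2
      have hc : culGo (fuel+1) memo 2 = (2, memo) := by simp [culGo]
      rw [hc, fSpec_base (by norm_num)]
      exact ⟨rfl, hinv⟩
    by_cases h3 : x = 3
    · subst h3
      have hc : culGo (fuel+1) memo 3 = (3, memo) := by simp [culGo]
      rw [hc, fSpec_base (by norm_num)]
      exact ⟨rfl, hinv⟩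
    have hx4 : 4 ≤ x := by omega
    simp only [culGo, h2, h3, if_false]
    by_cases hm : ((memo.get? x).getD 0) ≠ 0
    · rw [if_pos hm]
      refine ⟨?_, hinv⟩
      cases hg : memo.get? x with
      | none => rw [hg] at hm; simp at hm
      | some v => simpa using hinv x v hg
    · rw [if_neg hm]
      simp only [fd2, fd20]
      obtain ⟨ha1, ha2⟩ := ih (x/2) memo (by omega) (by omega) hinv
      obtain ⟨hb1, hb2⟩ := ih ((x+1)/2) ((culGo fuel memo (x/2)).2) (by omega) (by omega) ha2
      refine ⟨?_, ?_⟩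
      · simp only [ha1, hb1, md]
        rw [fSpec_step (show (3:Int) < x by omega)]
      · intro k v hk
        by_cases hkx : k = x
        · subst hkx
          rw [PySem.Dict.get?_insert_self] at hk
          injection hk with hk
          rw [← hk, ha1, hb1, md, fSpec_step (show (3:Int) < k by omega)]
        · rw [PySem.Dict.get?_insert_of_ne _ _ hkx] at hk
          exact hb2 k v hk

theorem cul_eq_fSpec {x : Int} (hx : 2 ≤ x) : cul x = fSpec x := by
  have := culGo_eq (x.natAbs + 1) x PySem.Dict.empty hx (by omega)
    (by intro k v hk; simp [PySem.Dict.get?_empty] at hk)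
  exact this.1

-- B-side: the accumulator of bDescend is only ever appended to
theorem bDescend_acc : ∀ (n : Nat) (lo hi : Int), hi.toNat ≤ n → ∀ acc,
    bDescend lo hi acc = (acc ++ (bDescend lo hi []).1, (bDescend lo hi []).2) := by
  intro n
  induction n with
  | zero =>
    intro lo hi hn acc
    have h : ¬ 3 < hi := by omega
    have hnil : bDescend lo hi [] = ([], lo, hi) := by rw [bDescend]; simp [h]
    rw [bDescend, hnil]
    simp [h]
  | succ n ih =>
    intro lo hi hn acc
    by_cases h : 3 < hi
    · have hlt : (PySem.Int.floordiv (hi+1) 2).toNat ≤ n := by rw [fd2]; omega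
      conv_lhs => rw [bDescend]
      conv_rhs => rw [bDescend]
      simp only [h, dif_pos]
      rw [ih _ _ hlt (acc ++ [(lo, hi)]), ih _ _ hlt ([] ++ [(lo, hi)])]
      simp
    · have hnil : bDescend lo hi [] = ([], lo, hi) := by rw [bDescend]; simp [h]
      rw [bDescend, hnil]
      simp [h]

def pvals (lo hi : Int) : PySem.Dict Int Int :=
  (bDescend lo hi []).1.reverse.foldl (fun vals p => bLevel vals p.1 p.2)
    (bBase (bDescend lo hi []).2.1 (bDescend lo hi []).2.2)

theorem pvals_base {lo hi : Int} (h : ¬ 3 < hi) : pvals lo hi = bBase lo hi := by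
  unfold pvals
  rw [bDescend]; simp [h]

theorem pvals_step {lo hi : Int} (h : 3 < hi) :
    pvals lo hi = bLevel (pvals (lo/2) ((hi+1)/2)) lo hi := by
  unfold pvals
  conv_lhs => rw [bDescend]
  simp only [h, dif_pos]
  rw [bDescend_acc (PySem.Int.floordiv (hi+1) 2).toNat _ _ (le_refl _) ([] ++ [(lo, hi)])]
  simp [List.foldl_append]

theorem pvals_sound : ∀ (n : Nat) (lo hi : Int), hi.toNat ≤ n →
    1 ≤ lo → lo ≤ hi → hi ≤ lo + 1 → 2 ≤ hi →
    ((pvals lo hi).get? hi = some (fSpec hi)) ∧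
    (2 ≤ lo → (pvals lo hi).get? lo = some (fSpec lo)) := by
  intro n
  induction n with
  | zero => intro lo hi hn; omega
  | succ n ih =>
    intro lo hi hn h1 h2 h3 h4
    by_cases h : 3 < hi
    · -- recursive level
      rw [pvals_step h]
      have hrec := ih (lo/2) ((hi+1)/2) (by omega) (by omega) (by omega) (by omega) (by omega)
      have hget : ∀ m : Int, 2 ≤ m → lo/2 ≤ m → m ≤ (hi+1)/2 →
          ((pvals (lo/2) ((hi+1)/2)).get? m).getD 0 = fSpec m := by
        intro m hm hml hmh
        by_cases hmhi : m = (hi+1)/2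
        · rw [hmhi, hrec.1]; rfl
        · have hme : m = lo/2 := by omega
          rw [hme, hrec.2 (by omega)]; rfl
      have hcell : ∀ m : Int, 2 ≤ m → lo ≤ m → m ≤ hi → bCell (pvals (lo/2) ((hi+1)/2)) m = fSpec m := by
        intro m hm hml hmh
        by_cases hb : m = 2 ∨ m = 3
        · have hf : fSpec m = m := fSpec_base (by omega)
          simp [bCell, hb, hf]
        · have hm4 : 4 ≤ m := by omega
          simp only [bCell, hb, if_false, fd2]
          rw [hget (m/2) (by omega) (by omega) (by omega),
              hget ((m+1)/2) (by omega) (by omega) (by omega), md,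
              fSpec_step (show (3:Int) < m by omega)]
      refine ⟨?_, ?_⟩
      · rw [bLevel, PySem.Dict.get?_insert_self, hcell hi (by omega) h2 (le_refl _)]
      · intro hlo2
        by_cases hlh : lo = hi
        · subst hlh
          rw [bLevel, PySem.Dict.get?_insert_self, hcell lo (by omega) (le_refl _) (le_refl _)]
        · rw [bLevel, PySem.Dict.get?_insert_of_ne _ _ hlh, PySem.Dict.get?_insert_self,
              hcell lo hlo2 (le_refl _) h2]
    · -- base level: lo and hi are in {2, 3}
      rw [pvals_base h]
      have hh : hi = 2 ∨ hi = 3 := by omega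
      refine ⟨?_, ?_⟩
      · unfold bBase
        simp only [hh, if_true]
        rw [PySem.Dict.get?_insert_self, fSpec_base (by omega)]
      · intro hlo2
        have hl : lo = 2 ∨ lo = 3 := by omega
        unfold bBase
        simp only [hh, hl, if_true]
        by_cases hlh : lo = hi
        · subst hlh
          rw [PySem.Dict.get?_insert_self, fSpec_base (by omega)]
        · rw [PySem.Dict.get?_insert_of_ne _ _ hlh, PySem.Dict.get?_insert_self,
              fSpec_base (by omega)]

theorem cul_alt_eq_fSpec {x : Int} (hx : 2 ≤ x) : cul_alt x = fSpec x := by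
  have h := (pvals_sound x.toNat x x (le_refl _) (by omega) (le_refl _) (by omega) hx).1
  unfold cul_alt
  unfold pvals at h
  simp only [h]
  rfl

-- ===== VERDICT (by name: the statement is the Claim_ definition above) =====
theorem cul_spec : Claim_equal_cul := by
  intro x _ hpre
  unfold Spec_cul
  rw [cul_eq_fSpec hpre, cul_alt_eq_fSpec hpre]
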